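-- pv_equiv track=rewrite | github.com/mauricio04mh/hex-ia-player | players/player_4_improved.py | _current_goal_axis_bounds
-- ===== SOURCE A (Python) =====
-- def _current_goal_axis_bounds(mat: list[list[int]], pid: int) -> tuple[int | None, int | None]:
--     """
--     Return current min/max occupied coordinate along the player's goal axis.
--
--     Player 1 -> columns matter
--     Player 2 -> rows matter
--     """
--     n = len(mat)
--     values: list[int] = []
--
--     for r in range(n):
--         for c in range(n):
--             if mat[r][c] == pid:
--                 values.append(c if pid == 1 else r)
--
--     if not values:
--         return None, None
--
--     return min(values), max(values)
-- ===== SOURCE B (Python) =====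
-- def _current_goal_axis_bounds(mat: list[list[int]], pid: int) -> tuple[int | None, int | None]:
--     n = len(mat)
--
--     def line_has(k: int) -> bool:
--         if pid == 1:
--             return any(mat[r][k] == pid for r in range(n))
--         return any(mat[k][c] == pid for c in range(n))
--
--     lo = next((k for k in range(n) if line_has(k)), None)
--     if lo is None:
--         return None, None
--     hi = next(k for k in range(n - 1, -1, -1) if line_has(k))
--     return lo, hi
-- ===== Notes on version B (the rewrite author's own statement) =====
-- stated objective: alternative
-- what changed: Instead of collecting one coordinate per occupied cell and taking min/max of that multiset, B never builds a value list: it does two short-circuiting directional searches over the goal-axis lines (columns for player 1, rows otherwise), returning the first occupied line scanning upward as the min and the first occupied line scanning downward as the max.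
import Mathlib
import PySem

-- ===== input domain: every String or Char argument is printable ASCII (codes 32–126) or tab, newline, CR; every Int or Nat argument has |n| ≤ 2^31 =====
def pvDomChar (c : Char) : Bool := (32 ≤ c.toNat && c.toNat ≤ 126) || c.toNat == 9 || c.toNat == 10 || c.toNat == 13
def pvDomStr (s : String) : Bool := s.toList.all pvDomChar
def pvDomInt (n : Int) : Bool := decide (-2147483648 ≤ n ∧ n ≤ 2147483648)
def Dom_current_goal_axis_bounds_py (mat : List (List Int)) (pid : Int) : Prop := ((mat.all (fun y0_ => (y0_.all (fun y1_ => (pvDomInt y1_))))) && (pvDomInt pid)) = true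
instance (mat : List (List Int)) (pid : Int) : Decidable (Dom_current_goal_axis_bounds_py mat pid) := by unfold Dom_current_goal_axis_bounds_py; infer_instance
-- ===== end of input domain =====

-- B replaces A's collect-all-coordinates-then-min/max by two short-circuiting directional
-- searches for the first occupied goal-axis line from each end; objective: alternative.

-- ===== PORT A =====
def current_goal_axis_bounds_py (mat : List (List Int)) (pid : Int) : Option Int × Option Int :=
  let n : Int := mat.length
  let values : List Int :=
    (PySem.List.pyRange 0 n 1).foldl (fun acc r =>
      (PySem.List.pyRange 0 n 1).foldl (fun acc2 c =>
        if PySem.List.pyGetD (PySem.List.pyGetD mat r []) c 0 == pid then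
          acc2 ++ [if pid == 1 then c else r]
        else acc2) acc) []
  if values = [] then (none, none)
  else (PySem.List.min? values (fun x => x), PySem.List.max? values (fun x => x))

-- ===== PORT B =====
def current_goal_axis_bounds_py_alt (mat : List (List Int)) (pid : Int) : Option Int × Option Int :=
  let n : Int := mat.length
  let lineHas : Int → Bool := fun k =>
    if pid == 1 then
      (PySem.List.pyRange 0 n 1).any (fun r =>
        PySem.List.pyGetD (PySem.List.pyGetD mat r []) k 0 == pid)
    else
      (PySem.List.pyRange 0 n 1).any (fun c =>
        PySem.List.pyGetD (PySem.List.pyGetD mat k []) c 0 == pid)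
  match (PySem.List.pyRange 0 n 1).find? lineHas with
  | none => (none, none)
  | some lo => (some lo, (PySem.List.pyRange (n - 1) (-1) (-1)).find? lineHas)

-- ===== PRECONDITION & SPEC =====
-- Pre_ excludes exactly the ragged matrices with a row shorter than len(mat), on which A's
-- mat[r][c] raises IndexError.
def Pre_current_goal_axis_bounds_py (mat : List (List Int)) (pid : Int) : Prop :=
  ∀ row ∈ mat, mat.length ≤ row.length
instance (mat : List (List Int)) (pid : Int) : Decidable (Pre_current_goal_axis_bounds_py mat pid) := by unfold Pre_current_goal_axis_bounds_py; infer_instance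
def pvWitness_current_goal_axis_bounds_py : List (List Int) × Int := ([[1, 2], [2, 1]], 1)

def Spec_current_goal_axis_bounds_py (mat : List (List Int)) (pid : Int) (out : Option Int × Option Int) : Prop := out = current_goal_axis_bounds_py_alt mat pid
instance (mat : List (List Int)) (pid : Int) (out : Option Int × Option Int) : Decidable (Spec_current_goal_axis_bounds_py mat pid out) := by unfold Spec_current_goal_axis_bounds_py; infer_instance

-- ===== CLAIM =====
def Claim_equal_current_goal_axis_bounds_py : Prop := ∀ (mat : List (List Int)) (pid : Int), Dom_current_goal_axis_bounds_py mat pid → Pre_current_goal_axis_bounds_py mat pid → Spec_current_goal_axis_bounds_py mat pid (current_goal_axis_bounds_py mat pid)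

-- ===== LEMMAS AND PROOFS =====

-- A's collected values, flattened into a flatMap of filtered ranges.
lemma values_eq_flatMap (mat : List (List Int)) (pid : Int) :
    (PySem.List.pyRange 0 (mat.length : Int) 1).foldl (fun acc r =>
      (PySem.List.pyRange 0 (mat.length : Int) 1).foldl (fun acc2 c =>
        if PySem.List.pyGetD (PySem.List.pyGetD mat r []) c 0 == pid then
          acc2 ++ [if pid == 1 then c else r]
        else acc2) acc) []
    = (PySem.List.pyRange 0 (mat.length : Int) 1).flatMap (fun r =>
        ((PySem.List.pyRange 0 (mat.length : Int) 1).filter (fun c =>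
          PySem.List.pyGetD (PySem.List.pyGetD mat r []) c 0 == pid)).map
          (fun c => if pid == 1 then c else r)) := by
  have hstep : ∀ (acc : List Int), ∀ r ∈ PySem.List.pyRange 0 (mat.length : Int) 1,
      (PySem.List.pyRange 0 (mat.length : Int) 1).foldl (fun acc2 c =>
        if PySem.List.pyGetD (PySem.List.pyGetD mat r []) c 0 == pid then
          acc2 ++ [if pid == 1 then c else r]
        else acc2) acc
      = acc ++ ((PySem.List.pyRange 0 (mat.length : Int) 1).filter (fun c =>
          PySem.List.pyGetD (PySem.List.pyGetD mat r []) c 0 == pid)).map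
          (fun c => if pid == 1 then c else r) := by
    intro acc r _
    exact PySem.List.foldl_append_if _ _ _ _
  calc (PySem.List.pyRange 0 (mat.length : Int) 1).foldl (fun acc r =>
      (PySem.List.pyRange 0 (mat.length : Int) 1).foldl (fun acc2 c =>
        if PySem.List.pyGetD (PySem.List.pyGetD mat r []) c 0 == pid then
          acc2 ++ [if pid == 1 then c else r]
        else acc2) acc) []
      = (PySem.List.pyRange 0 (mat.length : Int) 1).foldl (fun acc r =>
          acc ++ ((PySem.List.pyRange 0 (mat.length : Int) 1).filter (fun c =>
            PySem.List.pyGetD (PySem.List.pyGetD mat r []) c 0 == pid)).map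
            (fun c => if pid == 1 then c else r)) [] :=
        PySem.List.foldl_congr_mem _ _ _ _ hstep
    _ = _ := by rw [PySem.List.foldl_append_eq_flatMap]; simp

-- Membership in A's values list = membership in the range filtered by B's line predicate.
lemma mem_values_iff (mat : List (List Int)) (pid : Int) (x : Int) :
    (x ∈ (PySem.List.pyRange 0 (mat.length : Int) 1).flatMap (fun r =>
        ((PySem.List.pyRange 0 (mat.length : Int) 1).filter (fun c =>
          PySem.List.pyGetD (PySem.List.pyGetD mat r []) c 0 == pid)).map
          (fun c => if pid == 1 then c else r)))
    ↔ (x ∈ (PySem.List.pyRange 0 (mat.length : Int) 1).filter (fun k =>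
        if pid == 1 then
          (PySem.List.pyRange 0 (mat.length : Int) 1).any (fun r =>
            PySem.List.pyGetD (PySem.List.pyGetD mat r []) k 0 == pid)
        else
          (PySem.List.pyRange 0 (mat.length : Int) 1).any (fun c =>
            PySem.List.pyGetD (PySem.List.pyGetD mat k []) c 0 == pid))) := by
  by_cases hpid : pid = 1
  · subst hpid
    simp only [beq_self_eq_true, reduceIte, List.mem_flatMap, List.mem_map, List.mem_filter,
      List.any_eq_true]
    constructor
    · rintro ⟨r, hr, c, ⟨hc, hhit⟩, rfl⟩
      exact ⟨hc, r, hr, hhit⟩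
    · rintro ⟨hc, r, hr, hhit⟩
      exact ⟨r, hr, x, ⟨hc, hhit⟩, rfl⟩
  · have hb : (pid == 1) = false := by simpa using hpid
    simp only [hb, Bool.false_eq_true, reduceIte, List.mem_flatMap, List.mem_map,
      List.mem_filter, List.any_eq_true]
    constructor
    · rintro ⟨r, hr, c, ⟨hc, hhit⟩, rfl⟩
      exact ⟨hr, c, hc, hhit⟩
    · rintro ⟨hr, c, hc, hhit⟩
      exact ⟨x, hr, c, ⟨hc, hhit⟩, rfl⟩

-- min/max (key = id) over Int lists depend only on the membership set.
lemma min?_id_congr (xs ys : List Int) (h : ∀ x, x ∈ xs ↔ x ∈ ys) :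
    PySem.List.min? xs (fun x => x) = PySem.List.min? ys (fun x => x) := by
  cases hx : PySem.List.min? xs (fun x => x) with
  | none =>
      rw [PySem.List.min?_eq_none_iff] at hx
      have hy : ys = [] := List.eq_nil_iff_forall_not_mem.mpr
        (fun x hxy => by have := (h x).mpr hxy; rw [hx] at this; simp at this)
      exact ((PySem.List.min?_eq_none_iff ys _).mpr hy).symm
  | some m =>
      have hm : m ∈ ys := (h m).mp (PySem.List.min?_mem hx)
      cases hy : PySem.List.min? ys (fun x => x) with
      | none =>
          rw [PySem.List.min?_eq_none_iff] at hy
          simp [hy] at hm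
      | some m' =>
          have h1 := PySem.List.min?_isMin hx m' ((h m').mpr (PySem.List.min?_mem hy))
          have h2 := PySem.List.min?_isMin hy m hm
          simp only [Option.some.injEq]
          omega

lemma max?_id_congr (xs ys : List Int) (h : ∀ x, x ∈ xs ↔ x ∈ ys) :
    PySem.List.max? xs (fun x => x) = PySem.List.max? ys (fun x => x) := by
  cases hx : PySem.List.max? xs (fun x => x) with
  | none =>
      rw [PySem.List.max?_eq_none_iff] at hx
      have hy : ys = [] := List.eq_nil_iff_forall_not_mem.mpr
        (fun x hxy => by have := (h x).mpr hxy; rw [hx] at this; simp at this)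
      exact ((PySem.List.max?_eq_none_iff ys _).mpr hy).symm
  | some m =>
      have hm : m ∈ ys := (h m).mp (PySem.List.max?_mem hx)
      cases hy : PySem.List.max? ys (fun x => x) with
      | none =>
          rw [PySem.List.max?_eq_none_iff] at hy
          simp [hy] at hm
      | some m' =>
          have h1 := PySem.List.max?_isMax hx m' ((h m').mpr (PySem.List.max?_mem hy))
          have h2 := PySem.List.max?_isMax hy m hm
          simp only [Option.some.injEq]
          omega

-- On a strictly increasing list, min is the head and max is the last element.
lemma foldl_min_eq_self (t : List Int) (x : Int) (h : ∀ y ∈ t, x ≤ y) :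
    t.foldl min x = x := by
  induction t with
  | nil => rfl
  | cons y t ih =>
      have hxy : min x y = x := min_eq_left (h y (List.mem_cons_self))
      simp only [List.foldl_cons, hxy]
      exact ih (fun z hz => h z (List.mem_cons_of_mem _ hz))

lemma min?_id_eq_head? (xs : List Int) (h : xs.Pairwise (· < ·)) :
    PySem.List.min? xs (fun x => x) = xs.head? := by
  cases xs with
  | nil => simp [PySem.List.min?]
  | cons x t =>
      rw [PySem.List.min?_id_cons]
      have := List.pairwise_cons.mp h
      rw [foldl_min_eq_self t x (fun y hy => le_of_lt (this.1 y hy))]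
      rfl

lemma max?_id_eq_getLast? (xs : List Int) (h : xs.Pairwise (· ≤ ·)) :
    PySem.List.max? xs (fun x => x) = xs.getLast? := by
  induction xs with
  | nil => simp [PySem.List.max?]
  | cons x t ih =>
      cases t with
      | nil => simp [PySem.List.max?]
      | cons y t' =>
          have hp := List.pairwise_cons.mp h
          have hxy : x ≤ y := hp.1 y (List.mem_cons_self)
          rw [PySem.List.max?_id_cons]
          simp only [List.foldl_cons, max_eq_right hxy]
          rw [List.getLast?_cons_cons, ← ih hp.2, PySem.List.max?_id_cons]

-- ===== VERDICT =====
theorem current_goal_axis_bounds_py_spec : Claim_equal_current_goal_axis_bounds_py := by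
  intro mat pid _ _
  unfold Spec_current_goal_axis_bounds_py
  unfold current_goal_axis_bounds_py current_goal_axis_bounds_py_alt
  simp only []
  rw [values_eq_flatMap]
  set p : Int → Bool := fun k =>
    if pid == 1 then
      (PySem.List.pyRange 0 (mat.length : Int) 1).any (fun r =>
        PySem.List.pyGetD (PySem.List.pyGetD mat r []) k 0 == pid)
    else
      (PySem.List.pyRange 0 (mat.length : Int) 1).any (fun c =>
        PySem.List.pyGetD (PySem.List.pyGetD mat k []) c 0 == pid) with hp
  set V := (PySem.List.pyRange 0 (mat.length : Int) 1).flatMap (fun r =>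
      ((PySem.List.pyRange 0 (mat.length : Int) 1).filter (fun c =>
        PySem.List.pyGetD (PySem.List.pyGetD mat r []) c 0 == pid)).map
        (fun c => if pid == 1 then c else r)) with hV
  set C := (PySem.List.pyRange 0 (mat.length : Int) 1).filter p with hC
  have hmem : ∀ x, x ∈ V ↔ x ∈ C := by
    intro x; rw [hV, hC, hp]; exact mem_values_iff mat pid x
  have hpair : C.Pairwise (· < ·) :=
    (PySem.List.pairwise_lt_pyRange_one 0 (mat.length : Int)).sublist List.filter_sublist
  have hfind : (PySem.List.pyRange 0 (mat.length : Int) 1).find? p = C.head? :=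
    List.head?_filter.symm
  have hrev : PySem.List.pyRange ((mat.length : Int) - 1) (-1) (-1)
      = (PySem.List.pyRange 0 (mat.length : Int) 1).reverse := by
    rw [PySem.List.pyRange_neg_one_eq_reverse]; norm_num
  have hfindrev : (PySem.List.pyRange ((mat.length : Int) - 1) (-1) (-1)).find? p
      = C.getLast? := by
    rw [hrev, ← List.head?_filter, List.filter_reverse, List.head?_reverse]
  cases hf : (PySem.List.pyRange 0 (mat.length : Int) 1).find? p with
  | none =>
      have hCnil : C = [] := by
        rw [hfind] at hf
        cases hCc : C with
        | nil => rfl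
        | cons a t => rw [hCc] at hf; simp at hf
      have hVnil : V = [] := List.eq_nil_iff_forall_not_mem.mpr
        (fun x hx => by have := (hmem x).mp hx; rw [hCnil] at this; simp at this)
      rw [if_pos hVnil]
  | some lo =>
      have hlo : C.head? = some lo := by rw [← hfind, hf]
      have hCne : C ≠ [] := by intro h0; rw [h0] at hlo; simp at hlo
      have hVne : V ≠ [] := by
        intro h0
        obtain ⟨a, t, hCc⟩ := List.exists_cons_of_ne_nil hCne
        have ha : a ∈ C := by rw [hCc]; exact List.mem_cons_self
        have := (hmem a).mpr ha
        rw [h0] at this; simp at this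
      rw [if_neg hVne]
      rw [min?_id_congr V C hmem, max?_id_congr V C hmem]
      rw [min?_id_eq_head? C hpair, max?_id_eq_getLast? C (hpair.imp le_of_lt)]
      rw [hlo, hfindrev]
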